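-- pv_equiv track=rewrite | github.com/n0tsolikely/Synapse | runtime/synapse_runtime/automation_orchestrator.py | _classify_text_item
-- ===== SOURCE A (Python) =====
-- _ACTIVITY_HINT_PREFIXES = {
--     "question:": "question",
--     "unknown:": "unknown",
--     "constraint:": "constraint",
--     "risk:": "risk",
--     "uncertainty:": "risk",
--     "fact:": "repo_fact",
--     "discovery:": "repo_fact",
--     "dependency:": "dependency",
--     "non-goal:": "non_goal",
--     "milestone:": "milestone",
--     "idea:": "idea",
--     "decision:": "decision",
-- }
--
-- def _classify_text_item(text: str) -> tuple[str | None, str]: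
--     lowered = text.strip().lower()
--     for prefix, kind in _ACTIVITY_HINT_PREFIXES.items():
--         if lowered.startswith(prefix):
--             return kind, text[len(prefix):].strip() or text.strip()
--     if "?" in text:
--         return "question", text.strip()
--     return "neutral", text.strip()
-- ===== SOURCE B (Python) =====
-- _ACTIVITY_HINT_PREFIXES = {
--     "question:": "question",
--     "unknown:": "unknown",
--     "constraint:": "constraint",
--     "risk:": "risk",
--     "uncertainty:": "risk",
--     "fact:": "repo_fact",
--     "discovery:": "repo_fact",
--     "dependency:": "dependency",
--     "non-goal:": "non_goal",
--     "milestone:": "milestone",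
--     "idea:": "idea",
--     "decision:": "decision",
-- }
--
--
-- def _classify_text_item(text: str) -> tuple:
--     stripped = text.strip()
--     lowered = stripped.lower()
--     i = lowered.find(":")
--     if i >= 0:
--         kind = _ACTIVITY_HINT_PREFIXES.get(lowered[: i + 1])
--         if kind is not None:
--             return kind, text[i + 1 :].strip() or stripped
--     return ("question" if "?" in text else "neutral"), stripped
-- ===== Notes on version B (the rewrite author's own statement) =====
-- stated objective: idiomatic
-- what changed: Replaces the 12 sequential startswith scans over the dict items with a single search for the first colon computing the candidate head and one dict lookup; the loop disappears.
import Mathlib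
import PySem

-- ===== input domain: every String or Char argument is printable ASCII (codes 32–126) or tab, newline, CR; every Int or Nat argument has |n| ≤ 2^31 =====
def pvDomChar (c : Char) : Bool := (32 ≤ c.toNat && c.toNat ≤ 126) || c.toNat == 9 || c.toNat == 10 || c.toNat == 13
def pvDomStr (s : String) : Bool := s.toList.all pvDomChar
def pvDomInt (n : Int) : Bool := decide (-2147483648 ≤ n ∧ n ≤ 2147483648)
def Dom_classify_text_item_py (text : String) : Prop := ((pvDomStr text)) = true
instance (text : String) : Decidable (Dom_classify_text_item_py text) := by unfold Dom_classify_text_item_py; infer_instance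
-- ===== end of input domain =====

-- B replaces A's 12-prefix startswith loop by one first-colon search plus a single dict lookup (idiomatic; same behaviour).


-- ===== PORT A =====
def hintPrefixes : PySem.Dict String String := PySem.Dict.mk
  [("question:", "question"), ("unknown:", "unknown"), ("constraint:", "constraint"),
   ("risk:", "risk"), ("uncertainty:", "risk"), ("fact:", "repo_fact"),
   ("discovery:", "repo_fact"), ("dependency:", "dependency"), ("non-goal:", "non_goal"),
   ("milestone:", "milestone"), ("idea:", "idea"), ("decision:", "decision")]

-- the 'for prefix, kind in _ACTIVITY_HINT_PREFIXES.items():' loop with its early return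
def classifyLoop (text lowered : String) : List (String × String) → Option (String × String)
  | [] => none
  | (pfx, kind) :: rest =>
    if PySem.Str.startswith lowered pfx then
      some (kind,
        let r := PySem.Str.strip (PySem.Str.slice text (some (PySem.Str.len pfx)) none)
        if r = "" then PySem.Str.strip text else r)
    else classifyLoop text lowered rest

def classify_text_item_py (text : String) : String × String :=
  let lowered := PySem.Str.lower (PySem.Str.strip text)
  match classifyLoop text lowered hintPrefixes.items with
  | some r => r
  | none =>
    if PySem.Str.isIn "?" text then ("question", PySem.Str.strip text)
    else ("neutral", PySem.Str.strip text)

-- ===== PORT B =====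
def classify_text_item_py_alt (text : String) : String × String :=
  let stripped := PySem.Str.strip text
  let lowered := PySem.Str.lower stripped
  let i := PySem.Str.find lowered ":"
  let tail : String × String :=
    (if PySem.Str.isIn "?" text then "question" else "neutral", stripped)
  if 0 ≤ i then
    match hintPrefixes.get? (PySem.Str.slice lowered none (some (i + 1))) with
    | some kind =>
      let rest := PySem.Str.strip (PySem.Str.slice text (some (i + 1)) none)
      (kind, if rest = "" then stripped else rest)
    | none => tail
  else tail

-- ===== PRECONDITION & SPEC =====
def Spec_classify_text_item_py (text : String) (out : String × String) : Prop := out = classify_text_item_py_alt text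
instance (text : String) (out : String × String) : Decidable (Spec_classify_text_item_py text out) := by unfold Spec_classify_text_item_py; infer_instance

-- ===== CLAIM (what is proved, stated in full; the proofs are below) =====
def Claim_equal_classify_text_item_py : Prop := ∀ (text : String), Dom_classify_text_item_py text → Spec_classify_text_item_py text (classify_text_item_py text)

-- ===== LEMMAS AND PROOFS =====

-- [c] <+: l.drop j ↔ l[j]? = some c
theorem singleton_prefix_drop_iff (c : Char) (l : List Char) (j : Nat) :
    ([c] <+: l.drop j) ↔ l[j]? = some c := by
  rw [← List.head?_drop]
  cases h : l.drop j with
  | nil => simp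
  | cons x xs => simp [List.cons_prefix_cons, eq_comm]

theorem prefix_getElem? (l₁ l₂ : List Char) (h : l₁ <+: l₂) (i : Nat) (hi : i < l₁.length) :
    l₂[i]? = l₁[i]? := by
  rw [List.prefix_iff_eq_take.mp h, List.getElem?_take]
  simp [hi]

-- the heart: with the first colon of L at index n, a colon-terminated key is a prefix of L iff it IS L.take (n+1)
theorem colon_prefix_iff (L q : List Char) (n : Nat)
    (hcol : L[n]? = some ':') (hmin : ∀ j < n, L[j]? ≠ some ':') (hq : ':' ∉ q) :
    (q ++ [':'] <+: L) ↔ q ++ [':'] = L.take (n + 1) := by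
  constructor
  · intro h
    have hLq : L[q.length]? = some ':' := by
      rw [prefix_getElem? _ _ h q.length (by simp)]
      simp
    have hqn : n = q.length := by
      rcases Nat.lt_trichotomy n q.length with hlt | heq | hgt
      · exfalso
        have h2 := (prefix_getElem? _ _ h n (by simp; omega)).symm.trans hcol
        rw [List.getElem?_append_left hlt] at h2
        exact hq (List.mem_of_getElem? h2)
      · exact heq
      · exact absurd hLq (hmin q.length hgt)
    have := List.prefix_iff_eq_take.mp h
    simpa [hqn] using this
  · intro h
    rw [h]; exact List.take_prefix _ _

-- find L [':'] = n pins the colon at n and excludes earlier colons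
theorem find_colon_at (L : List Char) (n : Nat) (hn : PySem.Chars.find L [':'] = (n : Int)) :
    L[n]? = some ':' ∧ ∀ j < n, L[j]? ≠ some ':' := by
  have h0 : 0 ≤ PySem.Chars.find L [':'] := by rw [hn]; positivity
  obtain ⟨h1, h2⟩ := PySem.Chars.find_spec h0
  rw [hn] at h1 h2
  simp only [Int.toNat_natCast] at h1 h2
  refine ⟨(singleton_prefix_drop_iff _ _ _).mp h1, fun j hj hc => ?_⟩
  exact h2 j hj ((singleton_prefix_drop_iff _ _ _).mpr hc)

-- per-key characterisation at String level
theorem key_iff (lowered head p : String) (n : Nat)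
    (hn : PySem.Chars.find lowered.toList [':'] = (n : Int))
    (hhead : head.toList = lowered.toList.take (n + 1))
    (hlast : p.toList.getLast? = some ':') (hq : ':' ∉ p.toList.dropLast) :
    (PySem.Str.startswith lowered p = true) ↔ p = head := by
  obtain ⟨hcol, hmin⟩ := find_colon_at _ _ hn
  have hpne : p.toList ≠ [] := by intro h; rw [h] at hlast; simp at hlast
  have hsplit : p.toList.dropLast ++ [':'] = p.toList := by
    have := List.dropLast_append_getLast hpne
    rwa [List.getLast_eq_iff_getLast?_eq_some hpne |>.mpr hlast] at this
  have : (PySem.Str.startswith lowered p = true) ↔ p.toList <+: lowered.toList := by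
    simp [PySem.Chars.startswith_iff]
  rw [this, ← hsplit, colon_prefix_iff _ _ _ hcol hmin hq, ← hhead, hsplit]
  constructor
  · intro h; exact String.toList_inj.mp h
  · intro h; rw [h]

-- the loop returns none when no key matches
theorem loop_none (text lowered : String) (l : List (String × String))
    (h : ∀ pk ∈ l, PySem.Str.startswith lowered pk.1 = false) :
    classifyLoop text lowered l = none := by
  induction l with
  | nil => rfl
  | cons pk rest ih =>
    obtain ⟨p, k⟩ := pk
    simp only [classifyLoop]
    rw [h (p, k) List.mem_cons_self]
    simp only [Bool.false_eq_true, if_false]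
    exact ih fun x hx => h x (List.mem_cons_of_mem _ hx)

-- when matching is equivalent to equality with head, the scan is the dict lookup
theorem loop_lookup (text lowered head : String) (l : List (String × String))
    (h : ∀ pk ∈ l, (PySem.Str.startswith lowered pk.1 = true) ↔ pk.1 = head) :
    classifyLoop text lowered l = ((PySem.Dict.mk l).get? head).map (fun k => (k,
      let r := PySem.Str.strip (PySem.Str.slice text (some (PySem.Str.len head)) none)
      if r = "" then PySem.Str.strip text else r)) := by
  induction l with
  | nil => rfl
  | cons pk rest ih =>
    obtain ⟨p, k⟩ := pk
    have hmem := h (p, k) List.mem_cons_self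
    simp only [classifyLoop]
    rw [PySem.Dict.get?_mk_cons]
    by_cases hp : PySem.Str.startswith lowered p = true
    · have hpe : p = head := hmem.mp hp
      subst hpe
      rw [if_pos hp, if_pos (show (p == p) = true by simp), Option.map_some]
    · have hpe : p ≠ head := fun he => hp (hmem.mpr he)
      rw [if_neg hp, if_neg (show ¬((p == head) = true) by simp [hpe])]
      exact ih fun x hx => h x (List.mem_cons_of_mem _ hx)


theorem slice_head_toList (lowered : String) (f : Int) (hf : 0 ≤ f) :
    (PySem.Str.slice lowered none (some (f + 1))).toList = lowered.toList.take (f.toNat + 1) := by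
  simp only [PySem.Str.toList_slice, PySem.Chars.slice_eq_listSlice]
  rw [PySem.List.slice_to _ (by omega)]
  congr 1
  omega

-- ===== VERDICT (by name: the statement is the Claim_ definition above) =====
theorem classify_text_item_py_spec : Claim_equal_classify_text_item_py := by
  intro text _
  unfold Spec_classify_text_item_py
  unfold classify_text_item_py classify_text_item_py_alt
  dsimp only
  have hfind : PySem.Str.find (PySem.Str.lower (PySem.Str.strip text)) ":"
      = PySem.Chars.find (PySem.Str.lower (PySem.Str.strip text)).toList [':'] := by simp
  set lowered := PySem.Str.lower (PySem.Str.strip text) with hlow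
  by_cases hf : 0 ≤ PySem.Str.find lowered ":"
  · set f := PySem.Str.find lowered ":" with hfd
    set n := f.toNat with hn
    have hnc : PySem.Chars.find lowered.toList [':'] = (n : Int) := by
      rw [← hfind, hn]; omega
    set head := PySem.Str.slice lowered none (some (f + 1)) with hhead
    have hheadL : head.toList = lowered.toList.take (n + 1) := by
      rw [hhead, hn]; exact slice_head_toList lowered f hf
    have hkeys : ∀ pk ∈ hintPrefixes.items, (PySem.Str.startswith lowered pk.1 = true) ↔ pk.1 = head := by
      intro pk hpk
      simp only [hintPrefixes] at hpk
      fin_cases hpk <;>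
        exact key_iff lowered head _ n hnc hheadL (by decide) (by decide)
    rw [loop_lookup text lowered head _ hkeys]
    rw [if_pos hf]
    obtain ⟨hcol, -⟩ := find_colon_at lowered.toList n hnc
    have hnlt : n < lowered.toList.length := by
      by_contra hge
      rw [List.getElem?_eq_none (by omega)] at hcol
      simp at hcol
    have hlen : PySem.Str.len head = f + 1 := by
      rw [PySem.Str.len_eq, hheadL, List.length_take]
      omega
    cases hg : hintPrefixes.get? head with
    | none =>
      simp only [Option.map_none]
      split <;> rfl
    | some k =>
      simp only [Option.map_some, hlen]
  · have hninf : ¬ [':'] <:+: lowered.toList := by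
      intro h
      apply hf
      rw [hfind, PySem.Chars.find_nonneg_iff]
      exact h
    have hall : ∀ pk ∈ hintPrefixes.items, PySem.Str.startswith lowered pk.1 = false := by
      intro pk hpk
      cases hsw : PySem.Str.startswith lowered pk.1 with
      | false => rfl
      | true =>
        exfalso
        have hpre : pk.1.toList <+: lowered.toList := by
          simp only [PySem.Str.startswith_eq] at hsw
          rw [PySem.Chars.startswith_iff] at hsw
          exact hsw
        have hinf : [':'] <:+: pk.1.toList := by
          simp only [hintPrefixes] at hpk
          fin_cases hpk <;> decide
        exact hninf (hinf.trans hpre.isInfix)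
    rw [loop_none text lowered _ hall, if_neg hf]
    dsimp only
    split <;> rfl
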